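-- pv_equiv track=rewrite | github.com/JoshuaDunnink/Advent_of_Code | source/2023/day_4.py | determine_points
-- ===== SOURCE A (Python) =====
-- def determine_points(winning, have):
--     hits = 0
--     for num in have:
--         if num in winning:
--             if hits == 0:
--                 hits += 1
--             else:
--                 hits *= 2
--     return hits
-- ===== SOURCE B (Python) =====
-- def determine_points(winning, have):
--     count = sum(1 for num in have if num in winning)
--     return 2 ** (count - 1) if count > 0 else 0
-- ===== Notes on version B (the rewrite author's own statement) =====
-- stated objective: simpler
-- what changed: Replaces the iterative first-hit-1-then-double accumulation with counting the matches and a single closed-form exponentiation 2**(count-1).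
import Mathlib
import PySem

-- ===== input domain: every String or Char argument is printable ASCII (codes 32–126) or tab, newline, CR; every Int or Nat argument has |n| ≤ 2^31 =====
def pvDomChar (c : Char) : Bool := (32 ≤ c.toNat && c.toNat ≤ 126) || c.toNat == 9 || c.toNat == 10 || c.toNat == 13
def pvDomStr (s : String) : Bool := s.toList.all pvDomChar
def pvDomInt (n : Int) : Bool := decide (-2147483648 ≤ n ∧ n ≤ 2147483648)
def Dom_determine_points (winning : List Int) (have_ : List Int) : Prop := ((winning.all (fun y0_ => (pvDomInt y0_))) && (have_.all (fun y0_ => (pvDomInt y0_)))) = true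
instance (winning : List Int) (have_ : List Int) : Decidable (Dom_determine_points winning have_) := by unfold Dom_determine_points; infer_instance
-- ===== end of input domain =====

-- B replaces A's iterative "first hit = 1, then double" accumulation by a match count and one closed-form power 2^(count-1); objective: simpler.

-- ===== PORT A =====
def determine_points (winning : List Int) (have_ : List Int) : Int :=
  have_.foldl (fun hits num =>
    if winning.contains num then
      if hits = 0 then hits + 1 else hits * 2
    else hits) 0

-- ===== PORT B =====
def determine_points_alt (winning : List Int) (have_ : List Int) : Int :=
  let count := (have_.filter (fun num => winning.contains num)).length
  if count > 0 then (2 : Int) ^ (count - 1) else 0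

-- ===== PRECONDITION & SPEC =====
def Spec_determine_points (winning : List Int) (have_ : List Int) (out : Int) : Prop := out = determine_points_alt winning have_
instance (winning : List Int) (have_ : List Int) (out : Int) : Decidable (Spec_determine_points winning have_ out) := by unfold Spec_determine_points; infer_instance

-- ===== CLAIM (what is proved, stated in full; the proofs are below) =====
def Claim_equal_determine_points : Prop := ∀ (winning : List Int) (have_ : List Int), Dom_determine_points winning have_ → Spec_determine_points winning have_ (determine_points winning have_)

-- ===== LEMMAS AND PROOFS =====

-- once hits is a positive power of two, each further match doubles it
theorem dp_foldl_pow (winning : List Int) (l : List Int) (k : Nat) :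
    l.foldl (fun hits num =>
      if winning.contains num then
        if hits = 0 then hits + 1 else hits * 2
      else hits) ((2 : Int) ^ k)
    = (2 : Int) ^ (k + (l.filter (fun num => winning.contains num)).length) := by
  induction l generalizing k with
  | nil => simp
  | cons a t ih =>
    by_cases h : winning.contains a
    · have hne : (2 : Int) ^ k ≠ 0 := by positivity
      simp only [List.foldl_cons, List.filter_cons, h, if_pos, hne, if_false]
      rw [show (2 : Int) ^ k * 2 = (2 : Int) ^ (k + 1) by ring, ih]
      simp [List.length_cons]
      ring_nf
    · simp only [List.foldl_cons, List.filter_cons, h]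
      simp only [Bool.false_eq_true, if_false]
      exact ih k

theorem dp_main (winning : List Int) (l : List Int) :
    determine_points winning l = determine_points_alt winning l := by
  unfold determine_points determine_points_alt
  induction l with
  | nil => simp
  | cons a t ih =>
    by_cases h : winning.contains a
    · simp only [List.foldl_cons, List.filter_cons, h, if_true]
      rw [show (0:Int) + 1 = (2:Int)^0 by norm_num,
        dp_foldl_pow]
      simp [List.length_cons]
    · simp only [List.foldl_cons, List.filter_cons, h]
      simp only [Bool.false_eq_true, if_false]
      exact ih

-- ===== VERDICT (by name: the statement is the Claim_ definition above) =====
theorem determine_points_spec : Claim_equal_determine_points := by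
  intro winning have_ _
  unfold Spec_determine_points
  exact dp_main winning have_
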